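-- pv_equiv track=rewrite | github.com/adinashby-vanier-college/programming-in-science-lab-5-giacominaarcuri | Lab5.py | hollow_square
-- ===== SOURCE A (Python) =====
-- def hollow_square(n):
--     result = ""
--
--     for i in range(n):
--         for j in range(n):
--             if i == 0 or i == (n - 1) or j == 0 or j == (n - 1):
--                 result += "*"
--             else:
--                 result += " "
--
--         result += "\n"
--
--     return result.rstrip()
-- ===== SOURCE B (Python) =====
-- def hollow_square(n):
--     rows = []
--     for i in range(n):
--         if i == 0 or i == n - 1:
--             rows.append("*" * n)
--         else:
--             rows.append("*" + " " * (n - 2) + "*")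
--     return "\n".join(rows)
-- ===== Notes on version B (the rewrite author's own statement) =====
-- stated objective: simpler
-- what changed: B builds the figure row by row (a full '*'*n row for the first and last rows, '*' + ' '*(n-2) + '*' for interior rows) and joins the rows with newline, eliminating A's inner per-cell loop, the per-cell border test and the trailing rstrip.
import Mathlib
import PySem

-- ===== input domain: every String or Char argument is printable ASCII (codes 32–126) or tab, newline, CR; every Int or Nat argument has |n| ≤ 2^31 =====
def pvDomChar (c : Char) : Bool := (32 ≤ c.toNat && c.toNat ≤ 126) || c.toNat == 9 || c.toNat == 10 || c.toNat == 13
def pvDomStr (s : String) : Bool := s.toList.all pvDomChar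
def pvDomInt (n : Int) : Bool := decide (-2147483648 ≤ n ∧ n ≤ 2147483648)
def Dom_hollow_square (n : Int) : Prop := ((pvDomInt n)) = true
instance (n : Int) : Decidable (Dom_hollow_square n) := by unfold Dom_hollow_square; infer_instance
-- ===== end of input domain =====

-- B builds the hollow square row by row and joins with '\n' instead of A's per-cell nested loop + rstrip; objective: simpler.


-- ===== PORT A =====
-- literal port of A: cell-by-cell nested loops building one char list, then rstrip
def hollow_square (n : Int) : String :=
  String.mk (PySem.Chars.rstrip
    ((PySem.List.pyRange 0 n 1).foldl (fun result i =>
      ((PySem.List.pyRange 0 n 1).foldl (fun result j =>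
        if i = 0 ∨ i = n - 1 ∨ j = 0 ∨ j = n - 1 then result ++ ['*'] else result ++ [' '])
        result) ++ ['\n']) []))

-- ===== PORT B =====
-- literal port of B: one row string per i, joined with '\n'
def hollow_square_alt (n : Int) : String :=
  String.mk (PySem.Chars.join ['\n']
    ((PySem.List.pyRange 0 n 1).map (fun i =>
      if i = 0 ∨ i = n - 1 then List.replicate n.toNat '*'
      else ['*'] ++ List.replicate (n - 2).toNat ' ' ++ ['*'])))

-- ===== PRECONDITION & SPEC =====
def Spec_hollow_square (n : Int) (out : String) : Prop := out = hollow_square_alt n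
instance (n : Int) (out : String) : Decidable (Spec_hollow_square n out) := by unfold Spec_hollow_square; infer_instance

-- ===== CLAIM (what is proved, stated in full; the proofs are below) =====
def Claim_equal_hollow_square : Prop := ∀ (n : Int), Dom_hollow_square n → Spec_hollow_square n (hollow_square n)

-- ===== LEMMAS AND PROOFS =====

-- a fold that only appends a per-element, condition-chosen block is the flattened map
theorem pv_foldl_ite (p : Int → Prop) [DecidablePred p] (a b : List Char) :
    ∀ (l : List Int) (init : List Char),
      l.foldl (fun acc j => if p j then acc ++ a else acc ++ b) init
        = init ++ (l.map (fun j => if p j then a else b)).flatten := by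
  intro l
  induction l with
  | nil => simp
  | cons x xs ih =>
    intro init
    simp only [List.foldl_cons, List.map_cons, List.flatten_cons, ih]
    split_ifs <;> simp

theorem pv_foldl_app (g : Int → List Char) :
    ∀ (l : List Int) (init : List Char),
      l.foldl (fun acc i => acc ++ g i) init = init ++ (l.map g).flatten := by
  intro l
  induction l with
  | nil => simp
  | cons x xs ih => intro init; simp [ih]

theorem pv_flatten_rep (c : Char) : ∀ (k : Nat), (List.replicate k [c]).flatten = List.replicate k c := by
  intro k
  induction k with
  | zero => simp
  | succ k ih => simp [List.replicate_succ, ih]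

-- row i of A's scan equals B's row string, for every row index the loop visits
theorem pv_row (n i : Int) (h0 : 0 ≤ i) (hi : i < n) :
    ((PySem.List.pyRange 0 n 1).map
        (fun j => if i = 0 ∨ i = n - 1 ∨ j = 0 ∨ j = n - 1 then ['*'] else [' '])).flatten
      = if i = 0 ∨ i = n - 1 then List.replicate n.toNat '*'
        else ['*'] ++ List.replicate (n - 2).toNat ' ' ++ ['*'] := by
  by_cases hb : i = 0 ∨ i = n - 1
  · rw [if_pos hb]
    rw [List.map_congr_left (g := fun _ => (['*'] : List Char))
      (by intro j _; rw [if_pos (by tauto)])]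
    rw [List.map_const', pv_flatten_rep]
    rw [PySem.List.length_pyRange_one]
    norm_num
  · rw [if_neg hb]
    push_neg at hb
    obtain ⟨hi0, hin⟩ := hb
    have h1 : (1 : Int) ≤ i := by omega
    have h2 : i ≤ n - 2 := by omega
    rw [PySem.List.pyRange_one_append 0 1 n (by omega) (by omega),
        PySem.List.pyRange_one_append 1 (n - 1) n (by omega) (by omega)]
    have e0 : PySem.List.pyRange 0 1 1 = [0] := by
      rw [PySem.List.pyRange_one_cons (by omega), PySem.List.pyRange_one_eq_nil (by omega)]
    have e1 : PySem.List.pyRange (n - 1) n 1 = [n - 1] := by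
      rw [PySem.List.pyRange_one_cons (by omega), PySem.List.pyRange_one_eq_nil (by omega)]
    rw [e0, e1]
    simp only [List.map_append, List.flatten_append, List.map_cons, List.map_nil,
      List.flatten_cons, List.flatten_nil]
    rw [if_pos (by tauto), if_pos (by tauto)]
    rw [List.map_congr_left (g := fun _ => ([' '] : List Char))
      (by
        intro j hj
        rw [PySem.List.mem_pyRange_one] at hj
        rw [if_neg (by omega)])]
    rw [List.map_const', pv_flatten_rep, PySem.List.length_pyRange_one]
    have : (n - 1 - 1).toNat = (n - 2).toNat := by omega
    simp [this]

theorem pv_icc (sep a b : List Char) (l : List (List Char)) :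
    List.intercalate sep (a :: b :: l) = a ++ sep ++ List.intercalate sep (b :: l) := by
  simp [List.intercalate, List.intersperse]

theorem pv_flatten_newline :
    ∀ (rows : List (List Char)),
      (rows.map (fun r => r ++ ['\n'])).flatten
        = (if rows = [] then [] else List.intercalate ['\n'] rows ++ ['\n']) := by
  intro rows
  induction rows with
  | nil => simp
  | cons r rs ih =>
    cases rs with
    | nil => simp [List.intercalate]
    | cons s rs' =>
      simp only [List.map_cons, List.flatten_cons] at ih ⊢
      rw [ih]
      simp [pv_icc]

theorem pv_inter_last :
    ∀ (rows : List (List Char)), rows ≠ [] →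
      (∀ r ∈ rows, ∃ t, r = t ++ ['*']) →
      ∃ t, List.intercalate ['\n'] rows = t ++ ['*'] := by
  intro rows
  induction rows with
  | nil => intro h; exact absurd rfl h
  | cons r rs ih =>
    intro _ hall
    cases rs with
    | nil =>
      obtain ⟨t, ht⟩ := hall r (by simp)
      exact ⟨t, by simpa [List.intercalate] using ht⟩
    | cons s rs' =>
      obtain ⟨t, ht⟩ := ih (by simp) (fun r hr => hall r (by simp [hr]))
      exact ⟨r ++ ['\n'] ++ t, by rw [pv_icc, ht]; simp⟩

theorem pv_rstrip_concat (t : List Char) :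
    PySem.Chars.rstrip ((t ++ ['*']) ++ ['\n']) = t ++ ['*'] := by
  have h1 : PySem.Chars.isspace '\n' = true := by decide
  have h2 : PySem.Chars.isspace '*' = false := by decide
  simp [PySem.Chars.rstrip, h1, h2]

-- ===== VERDICT (by name: the statement is the Claim_ definition above) =====
theorem hollow_square_spec : Claim_equal_hollow_square := by
  intro n _
  unfold Spec_hollow_square hollow_square hollow_square_alt
  by_cases hn : n ≤ 0
  · rw [PySem.List.pyRange_one_eq_nil hn]
    simp [PySem.Chars.rstrip, PySem.Chars.join, List.intercalate]
  · push_neg at hn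
    -- rewrite A's outer fold body into append form
    have hinner : (fun (result : List Char) (i : Int) =>
        ((PySem.List.pyRange 0 n 1).foldl (fun result j =>
          if i = 0 ∨ i = n - 1 ∨ j = 0 ∨ j = n - 1 then result ++ ['*'] else result ++ [' '])
          result) ++ ['\n'])
        = (fun (result : List Char) (i : Int) => result ++
            (((PySem.List.pyRange 0 n 1).map
              (fun j => if i = 0 ∨ i = n - 1 ∨ j = 0 ∨ j = n - 1 then ['*'] else [' '])).flatten
              ++ ['\n'])) := by
      funext result i
      rw [pv_foldl_ite (fun j => i = 0 ∨ i = n - 1 ∨ j = 0 ∨ j = n - 1) ['*'] [' ']]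
      simp
    rw [hinner, pv_foldl_app, List.nil_append]
    -- rows of A equal rows of B
    have hrows : (PySem.List.pyRange 0 n 1).map (fun i =>
          (((PySem.List.pyRange 0 n 1).map
            (fun j => if i = 0 ∨ i = n - 1 ∨ j = 0 ∨ j = n - 1 then ['*'] else [' '])).flatten
            ++ ['\n']))
        = ((PySem.List.pyRange 0 n 1).map (fun i =>
            if i = 0 ∨ i = n - 1 then List.replicate n.toNat '*'
            else ['*'] ++ List.replicate (n - 2).toNat ' ' ++ ['*'])).map
          (fun r => r ++ ['\n']) := by
      rw [List.map_map]
      apply List.map_congr_left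
      intro i hi
      rw [PySem.List.mem_pyRange_one] at hi
      simp only [Function.comp]
      rw [pv_row n i hi.1 hi.2]
    rw [hrows]
    set rows : List (List Char) := (PySem.List.pyRange 0 n 1).map (fun i =>
      if i = 0 ∨ i = n - 1 then List.replicate n.toNat '*'
      else ['*'] ++ List.replicate (n - 2).toNat ' ' ++ ['*']) with hrowsdef
    have hne : rows ≠ [] := by
      have : rows.length = n.toNat := by
        rw [hrowsdef, List.length_map, PySem.List.length_pyRange_one]; omega
      intro h; rw [h] at this; simp at this; omega
    have hend : ∀ r ∈ rows, ∃ t, r = t ++ ['*'] := by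
      intro r hr
      rw [hrowsdef, List.mem_map] at hr
      obtain ⟨i, _, hri⟩ := hr
      by_cases hb : i = 0 ∨ i = n - 1
      · rw [if_pos hb] at hri
        refine ⟨List.replicate (n.toNat - 1) '*', ?_⟩
        rw [← hri, show n.toNat = (n.toNat - 1) + 1 from by omega, List.replicate_succ']
        norm_num
      · rw [if_neg hb] at hri
        exact ⟨['*'] ++ List.replicate (n - 2).toNat ' ', by rw [← hri]⟩
    rw [pv_flatten_newline, if_neg hne]
    obtain ⟨t, ht⟩ := pv_inter_last rows hne hend
    rw [ht, pv_rstrip_concat]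
    simp [PySem.Chars.join, ht]
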